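-- pv_equiv track=rewrite | github.com/martinnec/ontology-agent | src/index/bm25_full.py | _create_snippet
-- ===== SOURCE A (Python) =====
-- def _create_snippet(text: str, query: str, max_length: int = 200) -> str:
--     """Create a text snippet showing the query match."""
--     query_lower = query.lower()
--     text_lower = text.lower()
--
--     # Find the first occurrence of any query word
--     query_words = query_lower.split()
--     best_position = len(text)
--
--     for word in query_words:
--         pos = text_lower.find(word)
--         if pos != -1 and pos < best_position:
--             best_position = pos
--
--     if best_position == len(text):
--         # No match found, return beginning of text
--         return text[:max_length] + ("..." if len(text) > max_length else "")
--
--     # Create snippet around the match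
--     start = max(0, best_position - max_length // 2)
--     end = min(len(text), start + max_length)
--
--     snippet = text[start:end]
--     if start > 0:
--         snippet = "..." + snippet
--     if end < len(text):
--         snippet = snippet + "..."
--
--     return snippet
-- ===== SOURCE B (Python) =====
-- def _create_snippet(text: str, query: str, max_length: int = 200) -> str:
--     """Create a text snippet showing the query match."""
--     text_lower = text.lower()
--     query_words = query.lower().split()
--
--     # Single left-to-right scan over positions: first index where ANY query
--     # word starts (instead of one find() per word followed by taking the min).
--     pos = next(
--         (i for i in range(len(text_lower))
--          if any(text_lower.startswith(w, i) for w in query_words)),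
--         None,
--     )
--
--     if pos is None:
--         # No match found, return beginning of text
--         if len(text) > max_length:
--             return text[:max_length] + "..."
--         return text
--
--     start = max(0, pos - max_length // 2)
--     end = min(len(text), start + max_length)
--     return (("..." if start > 0 else "")
--             + text[start:end]
--             + ("..." if end < len(text) else ""))
-- ===== Notes on version B (the rewrite author's own statement) =====
-- stated objective: alternative
-- what changed: Replaces the per-word find()-and-take-minimum loop by a single left-to-right scan over text positions stopping at the first index where any query word starts, and assembles the snippet as one concatenation expression instead of sequential reassignments.
import Mathlib
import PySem

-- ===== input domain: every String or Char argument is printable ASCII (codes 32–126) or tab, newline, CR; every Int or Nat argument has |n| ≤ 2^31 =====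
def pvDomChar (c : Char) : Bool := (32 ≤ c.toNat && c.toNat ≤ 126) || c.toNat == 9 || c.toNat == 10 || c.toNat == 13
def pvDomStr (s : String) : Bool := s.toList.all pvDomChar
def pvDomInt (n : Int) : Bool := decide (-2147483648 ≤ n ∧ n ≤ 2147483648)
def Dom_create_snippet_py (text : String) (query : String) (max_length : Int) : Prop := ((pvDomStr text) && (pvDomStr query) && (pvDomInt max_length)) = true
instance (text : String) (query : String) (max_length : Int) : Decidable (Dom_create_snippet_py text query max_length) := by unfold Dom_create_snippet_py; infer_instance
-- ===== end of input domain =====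

-- B replaces A's per-word find()+min loop by one left-to-right position scan and builds the
-- result as a single concatenation (alternative algorithm of the same cost).

-- ===== PORT A =====
def create_snippet_py (text : String) (query : String) (max_length : Int) : String :=
  let query_lower := PySem.Chars.lower query.toList
  let text_lower := PySem.Chars.lower text.toList
  let query_words := PySem.Chars.split₀ query_lower
  let best_position : Int :=
    query_words.foldl (fun best word =>
      let pos := PySem.Chars.find text_lower word
      if pos ≠ -1 ∧ pos < best then pos else best) ((text.toList.length : Int))
  if best_position = (text.toList.length : Int) then
    String.ofList (PySem.Chars.slice text.toList none (some max_length) ++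
      (if (text.toList.length : Int) > max_length then ['.', '.', '.'] else []))
  else
    let start : Int := max 0 (best_position - PySem.Int.floordiv max_length 2)
    let stop : Int := min ((text.toList.length : Int)) (start + max_length)
    let snippet := PySem.Chars.slice text.toList (some start) (some stop)
    let snippet := if start > 0 then ['.', '.', '.'] ++ snippet else snippet
    let snippet := if stop < (text.toList.length : Int) then snippet ++ ['.', '.', '.'] else snippet
    String.ofList snippet

-- ===== PORT B =====
-- first position i (counting from the accumulator) at which any of the words starts; none if no position matches
def snippetScan (words : List (List Char)) : List Char → Nat → Option Nat
  | [], _ => none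
  | c :: rest, i =>
    if words.any (fun w => PySem.Chars.startswith (c :: rest) w) then some i
    else snippetScan words rest (i + 1)

def create_snippet_py_alt (text : String) (query : String) (max_length : Int) : String :=
  match snippetScan (PySem.Chars.split₀ (PySem.Chars.lower query.toList))
      (PySem.Chars.lower text.toList) 0 with
  | none =>
    if (text.toList.length : Int) > max_length then
      String.ofList (PySem.Chars.slice text.toList none (some max_length) ++ ['.', '.', '.'])
    else
      text
  | some p =>
    let start : Int := max 0 ((p : Int) - PySem.Int.floordiv max_length 2)
    let stop : Int := min ((text.toList.length : Int)) (start + max_length)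
    String.ofList ((if start > 0 then ['.', '.', '.'] else []) ++
      PySem.Chars.slice text.toList (some start) (some stop) ++
      (if stop < (text.toList.length : Int) then ['.', '.', '.'] else []))

-- ===== PRECONDITION & SPEC =====
def Spec_create_snippet_py (text : String) (query : String) (max_length : Int) (out : String) : Prop := out = create_snippet_py_alt text query max_length
instance (text : String) (query : String) (max_length : Int) (out : String) : Decidable (Spec_create_snippet_py text query max_length out) := by unfold Spec_create_snippet_py; infer_instance

-- ===== CLAIM (what is proved, stated in full; the proofs are below) =====
def Claim_equal_create_snippet_py : Prop := ∀ (text : String) (query : String) (max_length : Int), Dom_create_snippet_py text query max_length → Spec_create_snippet_py text query max_length (create_snippet_py text query max_length)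

-- ===== LEMMAS AND PROOFS =====

lemma split₀_go_ne_nil : ∀ (s cur : List Char) (acc : List (List Char)),
    (∀ a ∈ acc, a ≠ []) → ∀ w ∈ PySem.Chars.split₀.go s cur acc, w ≠ [] := by
  intro s
  induction s with
  | nil =>
    intro cur acc hacc w hw
    simp only [PySem.Chars.split₀.go] at hw
    split at hw
    · exact hacc w (List.mem_reverse.mp hw)
    · rename_i hcur
      rw [List.mem_reverse, List.mem_cons] at hw
      rcases hw with h | h
      · subst h
        have hcne : cur ≠ [] := by simpa [List.isEmpty_iff] using hcur
        intro hnil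
        exact hcne (List.reverse_eq_nil_iff.mp hnil)
      · exact hacc w h
  | cons c rest ih =>
    intro cur acc hacc w hw
    simp only [PySem.Chars.split₀.go] at hw
    split at hw
    · split at hw
      · exact ih [] acc hacc w hw
      · rename_i hcur
        refine ih [] (cur.reverse :: acc) ?_ w hw
        intro a ha
        rcases List.mem_cons.mp ha with h | h
        · subst h
          have hcne : cur ≠ [] := by simpa [List.isEmpty_iff] using hcur
          intro hnil
          exact hcne (List.reverse_eq_nil_iff.mp hnil)
        · exact hacc a h
    · exact ih (c :: cur) acc hacc w hw

lemma mem_split₀_ne_nil (s : List Char) : ∀ w ∈ PySem.Chars.split₀ s, w ≠ [] := by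
  intro w hw
  exact split₀_go_ne_nil s [] [] (by simp) w hw

lemma infix_iff_drop (w l : List Char) : w <:+: l ↔ ∃ k, w <+: l.drop k := by
  constructor
  · rintro ⟨s, t, rfl⟩
    exact ⟨s.length, by simp⟩
  · rintro ⟨k, hk⟩
    exact hk.isInfix.trans (l.drop_suffix k).isInfix

lemma scan_none (ws : List (List Char)) : ∀ (l : List Char) (i : Nat),
    snippetScan ws l i = none ↔ ∀ k < l.length, ∀ w ∈ ws, ¬ w <+: l.drop k := by
  intro l
  induction l with
  | nil => simp [snippetScan]
  | cons c rest ih =>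
    intro i
    simp only [snippetScan]
    split
    · rename_i hany
      simp only [List.any_eq_true, PySem.Chars.startswith_iff] at hany
      obtain ⟨w, hw, hpre⟩ := hany
      constructor
      · intro h; cases h
      · intro h; exact absurd hpre (h 0 (by simp) w hw)
    · rename_i hany
      rw [ih (i + 1)]
      constructor
      · intro h k hk w hw
        match k with
        | 0 =>
          simp only [List.any_eq_true, PySem.Chars.startswith_iff] at hany
          exact fun hp => hany ⟨w, hw, by simpa using hp⟩
        | k + 1 => exact h k (by simp at hk; omega) w hw
      · intro h k hk w hw
        exact h (k + 1) (by simp; omega) w hw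

lemma scan_some (ws : List (List Char)) : ∀ (l : List Char) (i j : Nat),
    snippetScan ws l i = some j →
    ∃ k, j = i + k ∧ k < l.length ∧ (∃ w ∈ ws, w <+: l.drop k) ∧
      (∀ m < k, ∀ w ∈ ws, ¬ w <+: l.drop m) := by
  intro l
  induction l with
  | nil => intro i j h; cases h
  | cons c rest ih =>
    intro i j h
    simp only [snippetScan] at h
    split at h
    · rename_i hany
      cases h
      simp only [List.any_eq_true, PySem.Chars.startswith_iff] at hany
      exact ⟨0, by simp, by simp, by simpa using hany, by simp⟩
    · rename_i hany
      obtain ⟨k, hk1, hk2, hk3, hk4⟩ := ih (i + 1) j h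
      refine ⟨k + 1, by omega, by simp; omega, by simpa using hk3, ?_⟩
      intro m hm w hw
      match m with
      | 0 =>
        simp only [List.any_eq_true, PySem.Chars.startswith_iff] at hany
        exact fun hp => hany ⟨w, hw, by simpa using hp⟩
      | m + 1 => exact hk4 m (by omega) w hw

lemma foldl_find_min (tl : List Char) (ws : List (List Char)) : ∀ b : Int, 0 ≤ b →
    0 ≤ ws.foldl (fun best word =>
        let pos := PySem.Chars.find tl word
        if pos ≠ -1 ∧ pos < best then pos else best) b ∧
    ws.foldl (fun best word =>
        let pos := PySem.Chars.find tl word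
        if pos ≠ -1 ∧ pos < best then pos else best) b ≤ b ∧
    (ws.foldl (fun best word =>
        let pos := PySem.Chars.find tl word
        if pos ≠ -1 ∧ pos < best then pos else best) b = b ∨
      ∃ w ∈ ws, 0 ≤ PySem.Chars.find tl w ∧
        ws.foldl (fun best word =>
          let pos := PySem.Chars.find tl word
          if pos ≠ -1 ∧ pos < best then pos else best) b = PySem.Chars.find tl w) ∧
    (∀ w ∈ ws, 0 ≤ PySem.Chars.find tl w →
      ws.foldl (fun best word =>
        let pos := PySem.Chars.find tl word
        if pos ≠ -1 ∧ pos < best then pos else best) b ≤ PySem.Chars.find tl w) := by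
  induction ws with
  | nil => intro b hb; exact ⟨hb, le_refl _, Or.inl rfl, by simp⟩
  | cons w ws ih =>
    intro b hb
    simp only [List.foldl_cons]
    have hfind : PySem.Chars.find tl w = -1 ∨ 0 ≤ PySem.Chars.find tl w := by
      by_cases h : w <:+: tl
      · exact Or.inr ((PySem.Chars.find_nonneg_iff tl w).mpr h)
      · exact Or.inl ((PySem.Chars.find_eq_neg_one_iff tl w).mpr h)
    set b' : Int := if PySem.Chars.find tl w ≠ -1 ∧ PySem.Chars.find tl w < b
      then PySem.Chars.find tl w else b with hb'def
    have hstep : 0 ≤ b' ∧ b' ≤ b ∧ (b' = b ∨ (0 ≤ PySem.Chars.find tl w ∧ b' = PySem.Chars.find tl w)) ∧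
        (0 ≤ PySem.Chars.find tl w → b' ≤ PySem.Chars.find tl w) := by
      rcases hfind with h | h
      · have hbb : b' = b := by rw [hb'def, if_neg]; intro hc; exact hc.1 h
        exact ⟨hbb ▸ hb, le_of_eq hbb, Or.inl hbb, fun h0 => by omega⟩
      · by_cases hlt : PySem.Chars.find tl w < b
        · have hbb : b' = PySem.Chars.find tl w := by
            rw [hb'def, if_pos]; exact ⟨by omega, hlt⟩
          exact ⟨hbb ▸ h, by omega, Or.inr ⟨h, hbb⟩, fun _ => le_of_eq hbb⟩
        · have hbb : b' = b := by rw [hb'def, if_neg]; intro hc; exact hlt hc.2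
          exact ⟨hbb ▸ hb, le_of_eq hbb, Or.inl hbb, fun _ => by omega⟩
    obtain ⟨hs0, hsle, hscases, hsmin⟩ := hstep
    obtain ⟨i0, i1, i2, i3⟩ := ih b' hs0
    refine ⟨i0, le_trans i1 hsle, ?_, ?_⟩
    · rcases i2 with h | ⟨w', hw', hf', he'⟩
      · rcases hscases with hbb | ⟨hf, hbb⟩
        · exact Or.inl (h.trans hbb)
        · exact Or.inr ⟨w, List.mem_cons_self, hf, h.trans hbb⟩
      · exact Or.inr ⟨w', List.mem_cons_of_mem _ hw', hf', he'⟩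
    · intro w'' hw'' hf''
      rcases List.mem_cons.mp hw'' with h | h
      · subst h; exact le_trans i1 (hsmin hf'')
      · exact i3 w'' h hf''

theorem key (text query : String) (max_length : Int) :
    create_snippet_py text query max_length = create_snippet_py_alt text query max_length := by
  simp only [create_snippet_py, create_snippet_py_alt]
  set tl := PySem.Chars.lower text.toList with htl
  set ws := PySem.Chars.split₀ (PySem.Chars.lower query.toList) with hws
  have hlen : tl.length = text.toList.length := by simp [htl, PySem.Chars.lower]
  have hne := mem_split₀_ne_nil (PySem.Chars.lower query.toList)
  obtain ⟨h0, hle, hcases, hmin⟩ :=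
    foldl_find_min tl ws (text.toList.length : Int) (by positivity)
  set r := ws.foldl (fun best word =>
      let pos := PySem.Chars.find tl word
      if pos ≠ -1 ∧ pos < best then pos else best) ((text.toList.length : Int)) with hr
  cases hscan : snippetScan ws tl 0 with
  | none =>
    have hbest : r = (text.toList.length : Int) := by
      rcases hcases with h | ⟨w, hw, hf, he⟩
      · exact h
      · exfalso
        obtain ⟨k, hk⟩ := (infix_iff_drop w tl).mp ((PySem.Chars.find_nonneg_iff tl w).mp hf)
        have hwne := hne w (hws ▸ hw)
        have hkl : k < tl.length := by
          by_contra hko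
          rw [List.drop_eq_nil_of_le (by omega)] at hk
          exact hwne (List.prefix_nil.mp hk)
        exact ((scan_none ws tl 0).mp hscan) k hkl w hw hk
    rw [if_pos hbest]
    by_cases hml : (text.toList.length : Int) > max_length
    · rw [if_pos hml, if_pos hml]
    · rw [if_neg hml, if_neg hml]
      have hml0 : (0 : Int) ≤ max_length := le_trans (by positivity) (not_lt.mp hml)
      rw [PySem.Chars.slice_eq_listSlice, PySem.List.slice_to _ hml0,
        List.take_of_length_le (by omega), List.append_nil, String.ofList_toList]
  | some p =>
    obtain ⟨k, hk0, hklt, ⟨w, hw, hpre⟩, hmin'⟩ := scan_some ws tl 0 p hscan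
    have hk0' : k = p := by omega
    subst hk0'
    have hfw0 : 0 ≤ PySem.Chars.find tl w :=
      (PySem.Chars.find_nonneg_iff tl w).mpr ((infix_iff_drop w tl).mpr ⟨k, hpre⟩)
    have htn : (PySem.Chars.find tl w).toNat = PySem.Chars.find tl w := Int.toNat_of_nonneg hfw0
    have hA : ¬ k < (PySem.Chars.find tl w).toNat :=
      fun hc => (PySem.Chars.find_spec hfw0).2 k hc hpre
    have hrle : r ≤ (k : Int) := le_trans (hmin w hw hfw0) (by omega)
    have hple : (k : Int) ≤ r := by
      rcases hcases with h | ⟨w', hw', hf', he'⟩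
      · omega
      · have htn' : (PySem.Chars.find tl w').toNat = PySem.Chars.find tl w' :=
          Int.toNat_of_nonneg hf'
        have hpre' := (PySem.Chars.find_spec hf').1
        have : ¬ (PySem.Chars.find tl w').toNat < k :=
          fun hc => hmin' _ hc w' hw' hpre'
        omega
    have hbest : r = (k : Int) := le_antisymm hrle hple
    rw [if_neg (by omega), hbest]
    refine congrArg String.ofList ?_
    split_ifs <;> simp


-- ===== VERDICT (by name: the statement is the Claim_ definition above) =====
theorem create_snippet_py_spec : Claim_equal_create_snippet_py := by
  intro text query max_length _
  exact key text query max_length
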